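-- pv_equiv track=rewrite | github.com/talha1503/Virtual-Community | ViCo/tools/utils.py | distance_to_bbox
-- ===== SOURCE A (Python) =====
-- def distance_to_bbox(pos, bbox):
-- 	x_coords = [point[0] for point in bbox]
-- 	y_coords = [point[1] for point in bbox]
-- 	min_x, max_x = min(x_coords), max(x_coords)
-- 	min_y, max_y = min(y_coords), max(y_coords)
-- 	if pos[0] < min_x:
-- 		dx = min_x - pos[0]
-- 	elif pos[0] > max_x:
-- 		dx = pos[0] - max_x
-- 	else:
-- 		dx = 0
-- 	if pos[1] < min_y:
-- 		dy = min_y - pos[1]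
-- 	elif pos[1] > max_y:
-- 		dy = pos[1] - max_y
-- 	else:
-- 		dy = 0
-- 	return dx + dy
-- ===== SOURCE B (Python) =====
-- def _axis_dist(p, coords):
--     # distance from p to the interval spanned by coords: 0 if p is sandwiched
--     # between two coordinates, otherwise the distance to the nearest coordinate
--     if any(c <= p for c in coords) and any(c >= p for c in coords):
--         return 0
--     return min(abs(c - p) for c in coords)
--
-- def distance_to_bbox(pos, bbox):
--     return _axis_dist(pos[0], [point[0] for point in bbox]) \
--          + _axis_dist(pos[1], [point[1] for point in bbox])
-- ===== Notes on version B (the rewrite author's own statement) =====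
-- stated objective: alternative
-- what changed: Instead of computing min/max extrema per axis and clamping against the interval, B tests sidedness: if some coordinate is <= p and some is >= p the axis contributes 0, otherwise all coordinates are on one side and the contribution is the minimum absolute difference to any coordinate (nearest point, no extrema computed).
import Mathlib
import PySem

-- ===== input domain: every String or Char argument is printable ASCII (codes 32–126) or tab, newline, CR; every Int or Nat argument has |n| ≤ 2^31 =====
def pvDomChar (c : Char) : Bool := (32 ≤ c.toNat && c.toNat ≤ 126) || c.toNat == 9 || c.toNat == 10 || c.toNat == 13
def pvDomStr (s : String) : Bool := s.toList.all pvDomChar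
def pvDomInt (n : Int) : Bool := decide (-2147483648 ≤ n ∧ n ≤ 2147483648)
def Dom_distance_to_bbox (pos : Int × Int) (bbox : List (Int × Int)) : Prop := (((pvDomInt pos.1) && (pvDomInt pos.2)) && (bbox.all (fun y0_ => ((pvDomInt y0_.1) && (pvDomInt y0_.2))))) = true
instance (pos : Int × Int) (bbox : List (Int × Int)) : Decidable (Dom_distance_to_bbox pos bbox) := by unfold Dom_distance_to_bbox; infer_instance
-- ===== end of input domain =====

-- B replaces A's per-axis extrema+clamp with a sidedness test: an axis contributes 0
-- when p lies between two coordinates, else the minimum absolute difference to any coordinate.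


-- ===== PORT A =====
def distance_to_bbox (pos : Int × Int) (bbox : List (Int × Int)) : Int :=
  let x_coords := bbox.map (fun point => point.1)
  let y_coords := bbox.map (fun point => point.2)
  -- min()/max() raise ValueError on the empty list; Pre_ excludes bbox = [], so getD 0 is never used
  let min_x := (PySem.List.min? x_coords (fun v => v)).getD 0
  let max_x := (PySem.List.max? x_coords (fun v => v)).getD 0
  let min_y := (PySem.List.min? y_coords (fun v => v)).getD 0
  let max_y := (PySem.List.max? y_coords (fun v => v)).getD 0
  let dx := if pos.1 < min_x then min_x - pos.1 else if pos.1 > max_x then pos.1 - max_x else 0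
  let dy := if pos.2 < min_y then min_y - pos.2 else if pos.2 > max_y then pos.2 - max_y else 0
  dx + dy

-- ===== PORT B =====
-- B's helper _axis_dist: sidedness test, then nearest-coordinate absolute distance
def axisDist (p : Int) (coords : List Int) : Int :=
  if (coords.any (fun c => decide (c ≤ p))) = true ∧ (coords.any (fun c => decide (p ≤ c))) = true then 0
  else (PySem.List.min? (coords.map (fun c => |c - p|)) (fun v => v)).getD 0
  -- min() over the empty generator raises ValueError; Pre_ excludes bbox = [], so getD 0 is never used

def distance_to_bbox_alt (pos : Int × Int) (bbox : List (Int × Int)) : Int :=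
  axisDist pos.1 (bbox.map (fun point => point.1))
    + axisDist pos.2 (bbox.map (fun point => point.2))

-- ===== PRECONDITION & SPEC =====
-- A raises ValueError (min of empty sequence) on bbox = []; excluded.
def Pre_distance_to_bbox (_pos : Int × Int) (bbox : List (Int × Int)) : Prop := bbox ≠ []
instance (pos : Int × Int) (bbox : List (Int × Int)) : Decidable (Pre_distance_to_bbox pos bbox) := by unfold Pre_distance_to_bbox; infer_instance
def pvWitness_distance_to_bbox : (Int × Int) × (List (Int × Int)) := ((3, -2), [(0, 0), (1, 4)])

def Spec_distance_to_bbox (pos : Int × Int) (bbox : List (Int × Int)) (out : Int) : Prop := out = distance_to_bbox_alt pos bbox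
instance (pos : Int × Int) (bbox : List (Int × Int)) (out : Int) : Decidable (Spec_distance_to_bbox pos bbox out) := by unfold Spec_distance_to_bbox; infer_instance

-- ===== CLAIM =====
def Claim_equal_distance_to_bbox : Prop := ∀ (pos : Int × Int) (bbox : List (Int × Int)), Dom_distance_to_bbox pos bbox → Pre_distance_to_bbox pos bbox → Spec_distance_to_bbox pos bbox (distance_to_bbox pos bbox)

-- ===== LEMMAS AND PROOFS =====

-- running min over an accumulator reaches ≤ p iff the accumulator or some element is ≤ p
lemma foldl_min_le_iff (p : Int) (t : List Int) :
    ∀ a : Int, t.foldl min a ≤ p ↔ (a ≤ p ∨ ∃ c ∈ t, c ≤ p) := by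
  induction t with
  | nil => intro a; simp
  | cons x s ih =>
    intro a
    simp only [List.foldl_cons, ih (min a x), List.mem_cons]
    constructor
    · rintro (h | ⟨c, hc, hcp⟩)
      · rcases le_total a x with h' | h'
        · exact Or.inl (by omega)
        · exact Or.inr ⟨x, Or.inl rfl, by omega⟩
      · exact Or.inr ⟨c, Or.inr hc, hcp⟩
    · rintro (h | ⟨c, hc | hc, hcp⟩)
      · exact Or.inl (by omega)
      · subst hc; exact Or.inl (by omega)
      · exact Or.inr ⟨c, hc, hcp⟩

lemma le_foldl_max_iff (p : Int) (t : List Int) :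
    ∀ a : Int, p ≤ t.foldl max a ↔ (p ≤ a ∨ ∃ c ∈ t, p ≤ c) := by
  induction t with
  | nil => intro a; simp
  | cons x s ih =>
    intro a
    simp only [List.foldl_cons, ih (max a x), List.mem_cons]
    constructor
    · rintro (h | ⟨c, hc, hcp⟩)
      · rcases le_total a x with h' | h'
        · exact Or.inr ⟨x, Or.inl rfl, by omega⟩
        · exact Or.inl (by omega)
      · exact Or.inr ⟨c, Or.inr hc, hcp⟩
    · rintro (h | ⟨c, hc | hc, hcp⟩)
      · exact Or.inl (by omega)
      · exact Or.inl (by omega)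
      · exact Or.inr ⟨c, hc, hcp⟩

-- subtracting p distributes over the running min
lemma foldl_min_map_sub (p : Int) (t : List Int) :
    ∀ a : Int, (t.map (fun c => c - p)).foldl min (a - p) = t.foldl min a - p := by
  induction t with
  | nil => intro a; simp
  | cons x s ih =>
    intro a
    simp only [List.map_cons, List.foldl_cons]
    rw [show min (a - p) (x - p) = min a x - p by omega, ih]

-- p - · turns the running max into a running min
lemma foldl_min_map_sub' (p : Int) (t : List Int) :
    ∀ a : Int, (t.map (fun c => p - c)).foldl min (p - a) = p - t.foldl max a := by
  induction t with
  | nil => intro a; simp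
  | cons x s ih =>
    intro a
    simp only [List.map_cons, List.foldl_cons]
    rw [show min (p - a) (p - x) = p - max a x by omega, ih]

-- per-axis equality: B's sidedness/nearest form equals A's extrema/clamp form
lemma axisDist_eq_clamp (p x : Int) (t : List Int) :
    axisDist p (x :: t) =
      (if p < t.foldl min x then t.foldl min x - p
       else if p > t.foldl max x then p - t.foldl max x else 0) := by
  unfold axisDist
  have hmin := foldl_min_le_iff p t x
  have hmax := le_foldl_max_iff p t x
  by_cases hL : (x :: t).any (fun c => decide (c ≤ p)) = true
  · by_cases hR : (x :: t).any (fun c => decide (p ≤ c)) = true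
    · -- some coordinate ≤ p and some ≥ p: min ≤ p ≤ max, both A branches are dead
      rw [if_pos ⟨hL, hR⟩]
      simp only [List.any_cons, List.any_eq_true, Bool.or_eq_true, decide_eq_true_eq] at hL hR
      have h1 : t.foldl min x ≤ p := hmin.2 (by tauto)
      have h2 : p ≤ t.foldl max x := hmax.2 (by tauto)
      rw [if_neg (by omega), if_neg (by omega)]
    · -- every coordinate is < p: contribution is p - max
      rw [if_neg (by tauto)]
      simp only [List.any_cons, List.any_eq_true, Bool.or_eq_true, decide_eq_true_eq,
        not_or, not_exists, not_and, not_le] at hR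
      have habs : (x :: t).map (fun c => |c - p|) = (x :: t).map (fun c => p - c) := by
        apply List.map_congr_left
        intro c hc
        rcases List.mem_cons.1 hc with h | h
        · subst h; rw [abs_of_nonpos (by omega)]; ring
        · have := hR.2 c h; rw [abs_of_nonpos (by omega)]; ring
      rw [habs]
      simp only [List.map_cons, PySem.List.min?_id_cons, Option.getD_some]
      rw [foldl_min_map_sub' p t x]
      have h2 : ¬ p ≤ t.foldl max x := by
        rw [hmax]
        push Not
        exact ⟨hR.1, fun c hc => hR.2 c hc⟩
      have h1 : t.foldl min x ≤ p := hmin.2 (Or.inl (le_of_lt hR.1))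
      rw [if_neg (by omega), if_pos (by omega)]
  · -- every coordinate is > p: contribution is min - p
    rw [if_neg (by tauto)]
    simp only [List.any_cons, List.any_eq_true, Bool.or_eq_true, decide_eq_true_eq,
      not_or, not_exists, not_and, not_le] at hL
    have habs : (x :: t).map (fun c => |c - p|) = (x :: t).map (fun c => c - p) := by
      apply List.map_congr_left
      intro c hc
      rcases List.mem_cons.1 hc with h | h
      · subst h; rw [abs_of_nonneg (by omega)]
      · have := hL.2 c h; rw [abs_of_nonneg (by omega)]
    rw [habs]
    simp only [List.map_cons, PySem.List.min?_id_cons, Option.getD_some]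
    rw [foldl_min_map_sub p t x]
    have h1 : ¬ t.foldl min x ≤ p := by
      rw [hmin]
      push Not
      exact ⟨hL.1, fun c hc => hL.2 c hc⟩
    rw [if_pos (by omega)]

-- ===== VERDICT =====
theorem distance_to_bbox_spec : Claim_equal_distance_to_bbox := by
  intro pos bbox _ hpre
  unfold Spec_distance_to_bbox distance_to_bbox distance_to_bbox_alt
  match bbox with
  | [] => exact absurd rfl hpre
  | q :: rest =>
    simp only [List.map_cons, PySem.List.min?_id_cons, PySem.List.max?_id_cons,
      Option.getD_some]
    rw [axisDist_eq_clamp, axisDist_eq_clamp]
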